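-- pv_equiv track=rewrite | github.com/Nomen-Heroum/Advent_of_Code | 2016/day13.py | count_reach
-- ===== SOURCE A (Python) =====
-- import copy
--
-- NUMBER = 1364
--
-- def neighbours(node, number=NUMBER):
--     def is_open(x, y):
--         if x < 0 or y < 0:
--             return False
--         num = (x + y)**2 + 3*x + y + number
--         if bin(num).count('1') % 2 == 0:
--             return True
--         return False
--
--     x0, y0 = node
--     neighs = ((x0 - 1, y0),
--               (x0, y0 - 1),
--               (x0 + 1, y0),
--               (x0, y0 + 1))
--     for new in neighs:
--         if is_open(*new):
--             yield new
--
-- def count_reach(start, steps):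
--     visited = {start}
--     to_visit = {start}
--
--     for _step in range(steps):
--         new = set()
--         for node in to_visit:
--             for neigh in neighbours(node):
--                 if neigh not in visited:
--                     visited.add(neigh)
--                     new.add(neigh)
--         to_visit = copy.deepcopy(new)
--
--     return len(visited)
-- ===== SOURCE B (Python) =====
-- NUMBER = 1364
--
-- def neighbours(node, number=NUMBER):
--     def is_open(x, y):
--         if x < 0 or y < 0:
--             return False
--         num = (x + y)**2 + 3*x + y + number
--         if bin(num).count('1') % 2 == 0:
--             return True
--         return False
--
--     x0, y0 = node
--     neighs = ((x0 - 1, y0),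
--               (x0, y0 - 1),
--               (x0 + 1, y0),
--               (x0, y0 + 1))
--     for new in neighs:
--         if is_open(*new):
--             yield new
--
-- def count_reach(start, steps):
--     # iterated neighbourhood closure of one set (no frontier bookkeeping),
--     # stopping as soon as a fixpoint is reached
--     reached = {start}
--     for _ in range(steps):
--         grown = reached | {n for node in reached for n in neighbours(node)}
--         if len(grown) == len(reached):
--             break
--         reached = grown
--     return len(reached)
-- ===== Notes on version B (the rewrite author's own statement) =====
-- stated objective: alternative
-- what changed: Replaces A's level-synchronous BFS over three sets (visited, to_visit, new, with per-node membership tests and a deepcopy per level) by an iterated neighbourhood closure of a single reached set that stops as soon as one iteration adds nothing, so the loop ends at the component's diameter instead of always running all `steps` levels.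
import Mathlib
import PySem

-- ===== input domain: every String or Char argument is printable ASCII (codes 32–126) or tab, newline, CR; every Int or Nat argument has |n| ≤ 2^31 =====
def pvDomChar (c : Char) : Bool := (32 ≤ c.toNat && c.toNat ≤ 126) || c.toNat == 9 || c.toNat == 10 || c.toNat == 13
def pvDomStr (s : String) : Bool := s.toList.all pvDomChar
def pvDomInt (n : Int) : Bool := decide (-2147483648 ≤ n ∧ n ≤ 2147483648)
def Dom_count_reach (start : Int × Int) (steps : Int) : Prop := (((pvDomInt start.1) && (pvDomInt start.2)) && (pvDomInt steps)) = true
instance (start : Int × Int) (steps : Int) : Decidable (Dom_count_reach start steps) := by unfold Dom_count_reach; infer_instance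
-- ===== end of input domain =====

-- B replaces A's three-set level BFS by an iterated neighbourhood closure of one set with a
-- fixpoint break (objective: alternative algorithm; the loop can stop before all `steps` levels).

-- ===== PORT A =====
-- shared module-level helper `neighbours` (textually identical in Source A and Source B).
-- bin(num).count('1') is PySem.Int.bitCount (exact, also for the nonnegative num arising here).
def pvIsOpen (x y : Int) : Bool :=
  if x < 0 ∨ y < 0 then false
  else
    let num : Int := (x + y) ^ 2 + 3 * x + y + 1364
    if PySem.Int.bitCount num % 2 == 0 then true else false

-- the generator yields, in order, the open ones among the four candidates
def pvNeighbours (node : Int × Int) : List (Int × Int) :=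
  [(node.1 - 1, node.2), (node.1, node.2 - 1), (node.1 + 1, node.2), (node.1, node.2 + 1)].filter
    (fun p => pvIsOpen p.1 p.2)

-- A's innermost body: if neigh not in visited: visited.add(neigh); new.add(neigh)
def pvAddNeigh (acc : PySem.Set (Int × Int) × PySem.Set (Int × Int)) (neigh : Int × Int) :
    PySem.Set (Int × Int) × PySem.Set (Int × Int) :=
  if acc.1.contains neigh then acc else (acc.1.add neigh, acc.2.add neigh)

-- for neigh in neighbours(node): …
def pvVisitNode (acc : PySem.Set (Int × Int) × PySem.Set (Int × Int)) (node : Int × Int) :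
    PySem.Set (Int × Int) × PySem.Set (Int × Int) :=
  (pvNeighbours node).foldl pvAddNeigh acc

-- one `_step`: new = set(); for node in to_visit: …; to_visit = deepcopy(new)
-- (len(visited) is order-independent, so iterating to_visit in list order is exact)
def pvStepA (st : PySem.Set (Int × Int) × PySem.Set (Int × Int)) :
    PySem.Set (Int × Int) × PySem.Set (Int × Int) :=
  st.2.foldl pvVisitNode (st.1, PySem.Set.empty)

def count_reach (start : Int × Int) (steps : Int) : Int :=
  let init := (PySem.Set.ofList [start], PySem.Set.ofList [start])
  let fin := (PySem.List.pyRange 0 steps 1).foldl (fun st _ => pvStepA st) init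
  PySem.Set.len fin.1

-- ===== PORT B =====
-- grown = reached | {n for node in reached for n in neighbours(node)}
def pvGrow (reached : PySem.Set (Int × Int)) : PySem.Set (Int × Int) :=
  reached.union (PySem.Set.ofList (reached.flatMap pvNeighbours))

-- one loop iteration; the Bool flag models the `break` (once true, nothing more happens)
def pvStepB (st : PySem.Set (Int × Int) × Bool) : PySem.Set (Int × Int) × Bool :=
  if st.2 then st
  else
    let grown := pvGrow st.1
    if PySem.Set.len grown == PySem.Set.len st.1 then (st.1, true) else (grown, false)

def count_reach_alt (start : Int × Int) (steps : Int) : Int :=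
  let fin := (PySem.List.pyRange 0 steps 1).foldl (fun st _ => pvStepB st)
    (PySem.Set.ofList [start], false)
  PySem.Set.len fin.1

-- ===== PRECONDITION & SPEC =====
def Spec_count_reach (start : Int × Int) (steps : Int) (out : Int) : Prop := out = count_reach_alt start steps
instance (start : Int × Int) (steps : Int) (out : Int) : Decidable (Spec_count_reach start steps out) := by unfold Spec_count_reach; infer_instance

-- ===== CLAIM (what is proved, stated in full; the proofs are below) =====
def Claim_equal_count_reach : Prop := ∀ (start : Int × Int) (steps : Int), Dom_count_reach start steps → Spec_count_reach start steps (count_reach start steps)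

-- ===== LEMMAS AND PROOFS =====

theorem mem_fst_addNeighFold (ns : List (Int × Int))
    (acc : PySem.Set (Int × Int) × PySem.Set (Int × Int)) (x : Int × Int) :
    x ∈ (ns.foldl pvAddNeigh acc).1 ↔ x ∈ acc.1 ∨ x ∈ ns := by
  induction ns generalizing acc with
  | nil => simp
  | cons nb rest ih =>
    simp only [List.foldl_cons, ih, pvAddNeigh]
    by_cases h : acc.1.contains nb = true
    · have hnb : nb ∈ acc.1 := (PySem.Set.contains_iff _ _).1 h
      simp only [h, if_pos]
      constructor
      · rintro (hx | hx)
        · exact Or.inl hx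
        · exact Or.inr (List.mem_cons_of_mem _ hx)
      · rintro (hx | hx)
        · exact Or.inl hx
        · rcases List.mem_cons.1 hx with rfl | hx
          · exact Or.inl hnb
          · exact Or.inr hx
    · simp only [h, if_neg, Bool.false_eq_true, not_false_iff, PySem.Set.mem_add, List.mem_cons]
      tauto

theorem mem_snd_addNeighFold (ns : List (Int × Int))
    (acc : PySem.Set (Int × Int) × PySem.Set (Int × Int)) (x : Int × Int) :
    x ∈ (ns.foldl pvAddNeigh acc).2 ↔ x ∈ acc.2 ∨ (x ∈ ns ∧ x ∉ acc.1) := by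
  induction ns generalizing acc with
  | nil => simp
  | cons nb rest ih =>
    simp only [List.foldl_cons, ih, pvAddNeigh]
    by_cases h : acc.1.contains nb = true
    · have hnb : nb ∈ acc.1 := (PySem.Set.contains_iff _ _).1 h
      simp only [h, if_pos, List.mem_cons]
      constructor
      · rintro (hx | ⟨hx, hn⟩)
        · exact Or.inl hx
        · exact Or.inr ⟨Or.inr hx, hn⟩
      · rintro (hx | ⟨rfl | hx, hn⟩)
        · exact Or.inl hx
        · exact absurd hnb hn
        · exact Or.inr ⟨hx, hn⟩
    · have hnb : nb ∉ acc.1 := fun hm => h ((PySem.Set.contains_iff _ _).2 hm)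
      simp only [h, if_neg, Bool.false_eq_true, not_false_iff, PySem.Set.mem_add, List.mem_cons]
      by_cases hx : x = nb
      · subst hx; tauto
      · tauto

theorem nodup_addNeighFold (ns : List (Int × Int))
    (acc : PySem.Set (Int × Int) × PySem.Set (Int × Int)) (h1 : acc.1.Nodup) (h2 : acc.2.Nodup) :
    (ns.foldl pvAddNeigh acc).1.Nodup ∧ (ns.foldl pvAddNeigh acc).2.Nodup := by
  induction ns generalizing acc with
  | nil => exact ⟨h1, h2⟩
  | cons nb rest ih =>
    simp only [List.foldl_cons, pvAddNeigh]
    by_cases h : acc.1.contains nb = true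
    · simp only [h, if_pos]; exact ih acc h1 h2
    · simp only [h, if_neg, Bool.false_eq_true, not_false_iff]
      exact ih _ (PySem.Set.nodup_add _ _ h1) (PySem.Set.nodup_add _ _ h2)

theorem mem_fst_visitFold (l : List (Int × Int))
    (acc : PySem.Set (Int × Int) × PySem.Set (Int × Int)) (x : Int × Int) :
    x ∈ (l.foldl pvVisitNode acc).1 ↔ x ∈ acc.1 ∨ ∃ n ∈ l, x ∈ pvNeighbours n := by
  induction l generalizing acc with
  | nil => simp
  | cons node rest ih =>
    simp only [List.foldl_cons, ih, pvVisitNode, mem_fst_addNeighFold, List.mem_cons]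
    constructor
    · rintro ((hx | hx) | ⟨n, hn, hxn⟩)
      · exact Or.inl hx
      · exact Or.inr ⟨node, Or.inl rfl, hx⟩
      · exact Or.inr ⟨n, Or.inr hn, hxn⟩
    · rintro (hx | ⟨n, rfl | hn, hxn⟩)
      · exact Or.inl (Or.inl hx)
      · exact Or.inl (Or.inr hxn)
      · exact Or.inr ⟨n, hn, hxn⟩

theorem mem_snd_visitFold (l : List (Int × Int))
    (acc : PySem.Set (Int × Int) × PySem.Set (Int × Int)) (x : Int × Int) :
    x ∈ (l.foldl pvVisitNode acc).2 ↔ x ∈ acc.2 ∨ ∃ n ∈ l, x ∈ pvNeighbours n ∧ x ∉ acc.1 := by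
  induction l generalizing acc with
  | nil => simp
  | cons node rest ih =>
    simp only [List.foldl_cons, ih, pvVisitNode, mem_snd_addNeighFold, mem_fst_addNeighFold,
      List.mem_cons]
    constructor
    · rintro ((hx | ⟨hx, hn⟩) | ⟨n, hn, hxn, hnv⟩)
      · exact Or.inl hx
      · exact Or.inr ⟨node, Or.inl rfl, hx, hn⟩
      · exact Or.inr ⟨n, Or.inr hn, hxn, fun hv => hnv (Or.inl hv)⟩
    · rintro (hx | ⟨n, rfl | hn, hxn, hnv⟩)
      · exact Or.inl (Or.inl hx)
      · exact Or.inl (Or.inr ⟨hxn, hnv⟩)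
      · by_cases hxv : x ∈ pvNeighbours node
        · exact Or.inl (Or.inr ⟨hxv, hnv⟩)
        · exact Or.inr ⟨n, hn, hxn, fun h => (h.elim hnv hxv)⟩

theorem nodup_visitFold (l : List (Int × Int))
    (acc : PySem.Set (Int × Int) × PySem.Set (Int × Int)) (h1 : acc.1.Nodup) (h2 : acc.2.Nodup) :
    (l.foldl pvVisitNode acc).1.Nodup ∧ (l.foldl pvVisitNode acc).2.Nodup := by
  induction l generalizing acc with
  | nil => exact ⟨h1, h2⟩
  | cons node rest ih =>
    simp only [List.foldl_cons, pvVisitNode]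
    exact ih _ (nodup_addNeighFold _ acc h1 h2).1 (nodup_addNeighFold _ acc h1 h2).2

theorem mem_fst_stepA (st : PySem.Set (Int × Int) × PySem.Set (Int × Int)) (x : Int × Int) :
    x ∈ (pvStepA st).1 ↔ x ∈ st.1 ∨ ∃ n ∈ st.2, x ∈ pvNeighbours n := by
  unfold pvStepA; rw [mem_fst_visitFold]

theorem mem_snd_stepA (st : PySem.Set (Int × Int) × PySem.Set (Int × Int)) (x : Int × Int) :
    x ∈ (pvStepA st).2 ↔ ∃ n ∈ st.2, x ∈ pvNeighbours n ∧ x ∉ st.1 := by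
  unfold pvStepA; rw [mem_snd_visitFold]
  simp [PySem.Set.empty]

theorem nodup_fst_stepA (st : PySem.Set (Int × Int) × PySem.Set (Int × Int))
    (h1 : st.1.Nodup) : (pvStepA st).1.Nodup := by
  unfold pvStepA
  exact (nodup_visitFold st.2 (st.1, PySem.Set.empty) h1 List.nodup_nil).1

theorem mem_grow (s : PySem.Set (Int × Int)) (x : Int × Int) :
    x ∈ pvGrow s ↔ x ∈ s ∨ ∃ n ∈ s, x ∈ pvNeighbours n := by
  unfold pvGrow
  rw [PySem.Set.mem_union, PySem.Set.mem_ofList, List.mem_flatMap]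

theorem nodup_grow (s : PySem.Set (Int × Int)) (h : s.Nodup) : (pvGrow s).Nodup :=
  PySem.Set.nodup_union _ _ h

-- len(grown) == len(reached) means the union added nothing: grown IS reached
theorem grow_eq_of_len_eq (s : PySem.Set (Int × Int))
    (h : PySem.Set.len (pvGrow s) = PySem.Set.len s) : pvGrow s = s := by
  have hu : pvGrow s = s ++ (PySem.Set.ofList
      (PySem.Set.ofList (s.flatMap pvNeighbours))).filter (fun y => !s.contains y) :=
    PySem.Set.update_eq_append_filter s _
  have hlen : s.length + ((PySem.Set.ofList
      (PySem.Set.ofList (s.flatMap pvNeighbours))).filter (fun y => !s.contains y)).length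
      = s.length := by
    rw [← List.length_append, ← hu]
    have h' := h
    simp only [PySem.Set.len] at h'
    exact_mod_cast h'
  have hnil : (PySem.Set.ofList
      (PySem.Set.ofList (s.flatMap pvNeighbours))).filter (fun y => !s.contains y) = [] :=
    List.length_eq_zero_iff.1 (by omega)
  rw [hu, hnil, List.append_nil]

-- the simulation invariant between A's (visited, to_visit) and B's (reached, done)
def pvInv (st : PySem.Set (Int × Int) × PySem.Set (Int × Int))
    (w : PySem.Set (Int × Int)) (done : Bool) : Prop :=
  st.1.Nodup ∧ w.Nodup ∧ (∀ x, x ∈ st.1 ↔ x ∈ w) ∧ (∀ x ∈ st.2, x ∈ st.1) ∧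
  (∀ x y, x ∈ st.1 → y ∈ pvNeighbours x → y ∈ st.1 ∨ ∃ z ∈ st.2, y ∈ pvNeighbours z) ∧
  (done = true → ∀ x y, x ∈ w → y ∈ pvNeighbours x → y ∈ w)

theorem pvInv_step (st : PySem.Set (Int × Int) × PySem.Set (Int × Int))
    (w : PySem.Set (Int × Int)) (done : Bool) (h : pvInv st w done) :
    pvInv (pvStepA st) (pvStepB (w, done)).1 (pvStepB (w, done)).2 := by
  obtain ⟨h1, h2, h3, h4, h5, h6⟩ := h
  have hA1 : ∀ x, x ∈ (pvStepA st).1 ↔ x ∈ st.1 ∨ ∃ n ∈ st.2, x ∈ pvNeighbours n :=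
    mem_fst_stepA st
  have hA2 : ∀ x, x ∈ (pvStepA st).2 ↔ ∃ n ∈ st.2, x ∈ pvNeighbours n ∧ x ∉ st.1 :=
    mem_snd_stepA st
  have hAnd : (pvStepA st).1.Nodup := nodup_fst_stepA st h1
  -- inv5 for the new A-state holds unconditionally
  have h5' : ∀ x y, x ∈ (pvStepA st).1 → y ∈ pvNeighbours x →
      y ∈ (pvStepA st).1 ∨ ∃ z ∈ (pvStepA st).2, y ∈ pvNeighbours z := by
    intro x y hx hy
    rcases (hA1 x).1 hx with hxv | hxn
    · rcases h5 x y hxv hy with hyv | ⟨z, hz, hyz⟩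
      · exact Or.inl ((hA1 y).2 (Or.inl hyv))
      · exact Or.inl ((hA1 y).2 (Or.inr ⟨z, hz, hyz⟩))
    · by_cases hxv : x ∈ st.1
      · rcases h5 x y hxv hy with hyv | ⟨z, hz, hyz⟩
        · exact Or.inl ((hA1 y).2 (Or.inl hyv))
        · exact Or.inl ((hA1 y).2 (Or.inr ⟨z, hz, hyz⟩))
      · obtain ⟨n, hn, hxn'⟩ := hxn
        exact Or.inr ⟨x, (hA2 x).2 ⟨n, hn, hxn', hxv⟩, hy⟩
  cases done with
  | true =>
    -- B already broke: the reached set is closed, so A adds nothing either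
    have hB : pvStepB (w, true) = (w, true) := rfl
    rw [hB]
    have hfix : ∀ x y, x ∈ w → y ∈ pvNeighbours x → y ∈ w := h6 rfl
    have hclosed : ∀ x, x ∈ (pvStepA st).1 ↔ x ∈ st.1 := by
      intro x
      rw [hA1]
      constructor
      · rintro (hx | ⟨n, hn, hxn⟩)
        · exact hx
        · exact (h3 x).2 (hfix n x ((h3 n).1 (h4 n hn)) hxn)
      · exact Or.inl
    refine ⟨hAnd, h2, ?_, ?_, h5', ?_⟩
    · intro x; rw [hclosed, h3]
    · intro x hx
      obtain ⟨n, hn, hxn, _⟩ := (hA2 x).1 hx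
      exact (hA1 x).2 (Or.inr ⟨n, hn, hxn⟩)
    · intro _; exact hfix
  | false =>
    simp only [pvStepB, if_neg, Bool.false_eq_true, not_false_iff]
    by_cases hlen : PySem.Set.len (pvGrow w) == PySem.Set.len w
    · -- fixpoint detected: B breaks, A's frontier produces nothing new
      have heq : pvGrow w = w := grow_eq_of_len_eq w (by exact_mod_cast (beq_iff_eq.1 hlen))
      have hfix : ∀ x y, x ∈ w → y ∈ pvNeighbours x → y ∈ w := by
        intro x y hx hy
        have : y ∈ pvGrow w := (mem_grow w y).2 (Or.inr ⟨x, hx, hy⟩)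
        rwa [heq] at this
      simp only [hlen, if_pos]
      refine ⟨hAnd, h2, ?_, ?_, h5', ?_⟩
      · intro x
        rw [hA1, ← h3]
        constructor
        · rintro (hx | ⟨n, hn, hxn⟩)
          · exact hx
          · exact (h3 x).2 (hfix n x ((h3 n).1 (h4 n hn)) hxn)
        · exact Or.inl
      · intro x hx
        obtain ⟨n, hn, hxn, _⟩ := (hA2 x).1 hx
        exact (hA1 x).2 (Or.inr ⟨n, hn, hxn⟩)
      · intro _; exact hfix
    · -- ordinary step: both sides grow to visited ∪ N(frontier) = reached ∪ N(reached)
      simp only [hlen, if_neg, Bool.false_eq_true, not_false_iff]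
      refine ⟨hAnd, nodup_grow w h2, ?_, ?_, h5', fun h => absurd h Bool.false_ne_true⟩
      · intro x
        rw [hA1, mem_grow]
        constructor
        · rintro (hx | ⟨n, hn, hxn⟩)
          · exact Or.inl ((h3 x).1 hx)
          · exact Or.inr ⟨n, (h3 n).1 (h4 n hn), hxn⟩
        · rintro (hx | ⟨n, hn, hxn⟩)
          · exact Or.inl ((h3 x).2 hx)
          · rcases h5 n x ((h3 n).2 hn) hxn with hxv | ⟨z, hz, hxz⟩
            · exact Or.inl hxv
            · exact Or.inr ⟨z, hz, hxz⟩
      · intro x hx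
        obtain ⟨n, hn, hxn, _⟩ := (hA2 x).1 hx
        exact (hA1 x).2 (Or.inr ⟨n, hn, hxn⟩)

theorem pvInv_fold (l : List Int) (st : PySem.Set (Int × Int) × PySem.Set (Int × Int))
    (w : PySem.Set (Int × Int)) (done : Bool) (h : pvInv st w done) :
    pvInv (l.foldl (fun st _ => pvStepA st) st)
      ((l.foldl (fun st _ => pvStepB st) (w, done)).1)
      ((l.foldl (fun st _ => pvStepB st) (w, done)).2) := by
  induction l generalizing st w done with
  | nil => exact h
  | cons i rest ih =>
    simp only [List.foldl_cons]
    have := pvInv_step st w done h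
    have hpair : pvStepB (w, done) = ((pvStepB (w, done)).1, (pvStepB (w, done)).2) := rfl
    rw [hpair]
    exact ih _ _ _ this

-- ===== VERDICT (by name: the statement is the Claim_ definition above) =====
theorem count_reach_spec : Claim_equal_count_reach := by
  unfold Claim_equal_count_reach
  intro start steps _
  unfold Spec_count_reach count_reach count_reach_alt
  have hbase : pvInv (PySem.Set.ofList [start], PySem.Set.ofList [start])
      (PySem.Set.ofList [start]) false := by
    refine ⟨PySem.Set.nodup_ofList _, PySem.Set.nodup_ofList _, fun x => Iff.rfl,
      fun x hx => hx, ?_, fun h => absurd h Bool.false_ne_true⟩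
    intro x y hx hy
    exact Or.inr ⟨x, hx, hy⟩
  obtain ⟨h1, h2, h3, _, _, _⟩ :=
    pvInv_fold (PySem.List.pyRange 0 steps 1) _ _ _ hbase
  have hperm := (List.perm_ext_iff_of_nodup h1 h2).2 h3
  simp only [PySem.Set.len]
  exact congrArg Int.ofNat hperm.length_eq
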